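-- pv_equiv track=rewrite | github.com/TheRealLuro/enigma | enigma_server/apis/database/multiplayer_runtime.py | _bridge_positions
-- ===== SOURCE A (Python) =====
-- def _bridge_positions(count: int) -> list[tuple[int, int]]:
--     if count <= 0:
--         return []
--     if count <= 6:
--         cols = 3
--     elif count <= 8:
--         cols = 4
--     else:
--         cols = 5
--     positions: list[tuple[int, int]] = []
--     for idx in range(count):
--         positions.append((idx // cols, idx % cols))
--     return positions
-- ===== SOURCE B (Python) =====
-- def _bridge_positions(count: int) -> list[tuple[int, int]]:
--     if count <= 0:
--         return []
--     if count <= 6: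
--         cols = 3
--     elif count <= 8:
--         cols = 4
--     else:
--         cols = 5
--     rows = (count + cols - 1) // cols
--     positions: list[tuple[int, int]] = []
--     placed = 0
--     for r in range(rows):
--         for c in range(cols):
--             if placed >= count:
--                 break
--             positions.append((r, c))
--             placed += 1
--     return positions
-- ===== Notes on version B (the rewrite author's own statement) =====
-- stated objective: alternative
-- what changed: Replaces the per-index //-and-% arithmetic with a row-by-row grid walk: compute rows = ceil(count/cols) and emit (r, c) from two nested counting loops that stop at count, so no division or modulo is performed per element.
import Mathlib
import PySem

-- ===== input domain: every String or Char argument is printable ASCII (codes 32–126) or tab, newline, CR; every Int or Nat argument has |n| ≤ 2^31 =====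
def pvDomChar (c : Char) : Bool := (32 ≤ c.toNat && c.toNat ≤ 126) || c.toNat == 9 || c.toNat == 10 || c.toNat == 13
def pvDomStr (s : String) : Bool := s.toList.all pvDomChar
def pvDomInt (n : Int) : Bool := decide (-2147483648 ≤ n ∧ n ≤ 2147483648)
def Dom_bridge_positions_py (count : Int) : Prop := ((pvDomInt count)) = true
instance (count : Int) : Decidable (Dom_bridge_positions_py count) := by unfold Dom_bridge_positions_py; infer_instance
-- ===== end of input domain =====

-- B replaces A's per-index //-and-% arithmetic with a row-by-row nested grid walk that stops at count (alternative decomposition, same cost).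


-- ===== PORT A =====
def bridge_positions_py (count : Int) : List (Int × Int) :=
  if count ≤ 0 then []
  else
    let cols : Int := if count ≤ 6 then 3 else if count ≤ 8 then 4 else 5
    (PySem.List.pyRange 0 count 1).foldl
      (fun positions idx => positions ++ [(PySem.Int.floordiv idx cols, PySem.Int.mod idx cols)]) []

-- ===== PORT B =====
-- inner 'for c in range(cols)' loop of Source B, with its 'break' when placed >= count
def bpInner (count r : Int) : List Int → List (Int × Int) → Int → (List (Int × Int) × Int)
  | [], positions, placed => (positions, placed)
  | c :: rest, positions, placed =>
      if count ≤ placed then (positions, placed)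
      else bpInner count r rest (positions ++ [(r, c)]) (placed + 1)

def bridge_positions_py_alt (count : Int) : List (Int × Int) :=
  if count ≤ 0 then []
  else
    let cols : Int := if count ≤ 6 then 3 else if count ≤ 8 then 4 else 5
    let rows : Int := PySem.Int.floordiv (count + cols - 1) cols
    ((PySem.List.pyRange 0 rows 1).foldl
      (fun st r => bpInner count r (PySem.List.pyRange 0 cols 1) st.1 st.2) ([], 0)).1

-- ===== PRECONDITION & SPEC =====
def Spec_bridge_positions_py (count : Int) (out : List (Int × Int)) : Prop := out = bridge_positions_py_alt count
instance (count : Int) (out : List (Int × Int)) : Decidable (Spec_bridge_positions_py count out) := by unfold Spec_bridge_positions_py; infer_instance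

-- ===== CLAIM (what is proved, stated in full; the proofs are below) =====
def Claim_equal_bridge_positions_py : Prop := ∀ (count : Int), Dom_bridge_positions_py count → Spec_bridge_positions_py count (bridge_positions_py count)

-- ===== LEMMAS AND PROOFS =====

-- the per-index pair A computes
def bpG (cols idx : Int) : Int × Int := (PySem.Int.floordiv idx cols, PySem.Int.mod idx cols)

-- bpInner appends (r, c) for the first (count - placed) remaining column values
lemma bpInner_spec (count r : Int) :
    ∀ (ccs : List Int) (pos : List (Int × Int)) (placed : Int),
      bpInner count r ccs pos placed =
        (pos ++ (ccs.take (count - placed).toNat).map (fun c => (r, c)),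
         placed + ((ccs.take (count - placed).toNat).length : Int)) := by
  intro ccs
  induction ccs with
  | nil => intro pos placed; simp [bpInner]
  | cons c rest ih =>
    intro pos placed
    by_cases h : count ≤ placed
    · have : (count - placed).toNat = 0 := by omega
      simp [bpInner, h, this]
    · have h1 : (count - placed).toNat = (count - (placed + 1)).toNat + 1 := by omega
      rw [bpInner]
      simp only [if_neg h, ih, h1, List.take_succ_cons, List.map_cons, List.length_cons,
        Prod.mk.injEq]
      refine ⟨by simp, by push_cast; ring⟩

-- processing one row r0 advances the canonical state from r0 to r0 + 1
lemma bpRow_step (count cols r0 : Int) (hcount : 0 < count) (hcols : 0 < cols) (hr0 : 0 ≤ r0) :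
    bpInner count r0 (PySem.List.pyRange 0 cols 1)
        ((PySem.List.pyRange 0 (min (r0 * cols) count) 1).map (bpG cols))
        (min (r0 * cols) count)
      = ((PySem.List.pyRange 0 (min ((r0 + 1) * cols) count) 1).map (bpG cols),
         min ((r0 + 1) * cols) count) := by
  have hp : 0 ≤ r0 * cols := mul_nonneg hr0 (le_of_lt hcols)
  have hmul : (r0 + 1) * cols = r0 * cols + cols := by ring
  rw [bpInner_spec]
  set placed := min (r0 * cols) count with hplaced
  set m : Nat := min (count - placed).toNat cols.toNat with hm
  have htake : (PySem.List.pyRange 0 cols 1).take (count - placed).toNat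
      = (List.range m).map (fun k : Nat => ((k : Int))) := by
    rw [PySem.List.pyRange_one, ← List.map_take, List.take_range, sub_zero, hm]
    simp
  have hplaced0 : 0 ≤ placed := by omega
  have hP : min ((r0 + 1) * cols) count = placed + (m : Int) := by
    simp only [hm, hplaced, hmul]; omega
  have hPNat : (min ((r0 + 1) * cols) count - 0).toNat = placed.toNat + m := by omega
  rw [htake, PySem.List.pyRange_one 0 (min ((r0 + 1) * cols) count), hPNat,
      List.range_add, List.map_append, List.map_append, List.map_map, List.map_map,
      PySem.List.pyRange_one 0 placed, sub_zero, List.map_map]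
  simp only [Prod.mk.injEq]
  constructor
  · congr 1
    simp only [List.map_map]
    apply List.map_congr_left
    intro k hk
    have hk' : k < m := List.mem_range.mp hk
    have hkc : (k : Int) < cols := by
      have h1 : m ≤ cols.toNat := by omega
      have : (k : Int) < (cols.toNat : Int) := by exact_mod_cast hk'.trans_le h1
      omega
    have hlt : placed < count := by
      by_contra hge
      have : (count - placed).toNat = 0 := by omega
      simp only [hm, this] at hk'; omega
    have hpl : placed = r0 * cols := by omega
    have hidx : (0 : Int) + ((placed.toNat + k : Nat) : Int) = r0 * cols + (k : Int) := by
      push_cast; omega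
    simp only [Function.comp_apply, hidx, bpG]
    have hfd : PySem.Int.floordiv (r0 * cols + (k : Int)) cols = r0 := by
      rw [PySem.Int.floordiv_eq_iff_of_pos hcols]
      have hk0 : (0 : Int) ≤ k := by positivity
      omega
    have hmod : PySem.Int.mod (r0 * cols + (k : Int)) cols = (k : Int) := by
      have h2 := PySem.Int.floordiv_mul_add_mod (r0 * cols + (k : Int)) cols
      rw [hfd] at h2; omega
    rw [hfd, hmod]
  · simp only [List.length_map, List.length_range]
    omega

-- folding the outer loop over rows r0 .. r0+n keeps the canonical state
lemma bpOuter_inv (count cols : Int) (hcount : 0 < count) (hcols : 0 < cols) :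
    ∀ (n : Nat) (r0 : Int), 0 ≤ r0 →
      (PySem.List.pyRange r0 (r0 + n) 1).foldl
          (fun st r => bpInner count r (PySem.List.pyRange 0 cols 1) st.1 st.2)
          ((PySem.List.pyRange 0 (min (r0 * cols) count) 1).map (bpG cols),
           min (r0 * cols) count)
        = ((PySem.List.pyRange 0 (min ((r0 + n) * cols) count) 1).map (bpG cols),
           min ((r0 + n) * cols) count) := by
  intro n
  induction n with
  | zero =>
    intro r0 _
    rw [PySem.List.pyRange_one_eq_nil (a := r0) (b := r0 + ((0 : Nat) : Int)) (by simp)]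
    norm_num
  | succ n ih =>
    intro r0 hr0
    rw [PySem.List.pyRange_one_cons (a := r0) (b := r0 + ((n + 1 : Nat) : Int))
        (by push_cast; omega)]
    rw [List.foldl_cons]
    rw [bpRow_step count cols r0 hcount hcols hr0]
    have h1 : r0 + ((n + 1 : Nat) : Int) = (r0 + 1) + (n : Int) := by push_cast; ring
    rw [h1]
    exact ih (r0 + 1) (by omega)

-- the main equality for a positive count and a positive cols
lemma bridge_core (count cols : Int) (hcount : 0 < count) (hcols : 0 < cols) :
    (PySem.List.pyRange 0 count 1).map (bpG cols)
      = ((PySem.List.pyRange 0 (PySem.Int.floordiv (count + cols - 1) cols) 1).foldl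
          (fun st r => bpInner count r (PySem.List.pyRange 0 cols 1) st.1 st.2) ([], 0)).1 := by
  set rows : Int := PySem.Int.floordiv (count + cols - 1) cols with hrows
  have hbr := (PySem.Int.floordiv_eq_iff_of_pos hcols (a := count + cols - 1) (q := rows)).mp rfl
  have hmul2 : (rows + 1) * cols = rows * cols + cols := by ring
  have hge : count ≤ rows * cols := by omega
  have hrnn : 0 ≤ rows := by
    by_contra h
    have h1 : rows ≤ -1 := by omega
    have hrc : rows * cols ≤ (-1) * cols :=
      mul_le_mul_of_nonneg_right h1 (le_of_lt hcols)
    have : (-1 : Int) * cols = -cols := by ring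
    omega
  have hstep := bpOuter_inv count cols hcount hcols rows.toNat 0 le_rfl
  have hcast : (0 : Int) + (rows.toNat : Int) = rows := by omega
  rw [hcast] at hstep
  have h0 : min ((0 : Int) * cols) count = 0 := by
    have : (0 : Int) * cols = 0 := by ring
    omega
  rw [h0] at hstep
  rw [PySem.List.pyRange_one_eq_nil (le_refl (0 : Int)), List.map_nil] at hstep
  have hmin : min (rows * cols) count = count := by omega
  rw [hmin] at hstep
  rw [hstep]

-- ===== VERDICT (by name: the statement is the Claim_ definition above) =====
theorem bridge_positions_py_spec : Claim_equal_bridge_positions_py := by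
  intro count _
  unfold Spec_bridge_positions_py bridge_positions_py bridge_positions_py_alt
  by_cases h0 : count ≤ 0
  · simp [h0]
  · simp only [if_neg h0]
    rw [show (List.foldl (fun positions idx =>
          positions ++ [(PySem.Int.floordiv idx (if count ≤ 6 then 3 else if count ≤ 8 then 4 else 5),
            PySem.Int.mod idx (if count ≤ 6 then 3 else if count ≤ 8 then 4 else 5))]) []
          (PySem.List.pyRange 0 count 1))
        = (PySem.List.pyRange 0 count 1).map
            (bpG (if count ≤ 6 then 3 else if count ≤ 8 then 4 else 5)) from by
      simpa using PySem.List.foldl_append_singleton_eq_map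
        (bpG (if count ≤ 6 then 3 else if count ≤ 8 then 4 else 5))
        (PySem.List.pyRange 0 count 1) []]
    by_cases h6 : count ≤ 6
    · simp only [if_pos h6]; exact bridge_core count 3 (by omega) (by omega)
    · simp only [if_neg h6]
      by_cases h8 : count ≤ 8
      · simp only [if_pos h8]; exact bridge_core count 4 (by omega) (by omega)
      · simp only [if_neg h8]; exact bridge_core count 5 (by omega) (by omega)
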